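-- pv_equiv track=rewrite | github.com/Ashutoshchoudhary3/UpdateLibra | ai_engine/agents/character_extractor.py | _parse_character_text
-- ===== SOURCE A (Python) =====
-- from typing import List, Dict, Any
--
-- def _parse_character_text(text: str) -> List[Dict[str, Any]]:
--     """Fallback parsing for character information"""
--     characters = []
--
--     # Simple heuristic parsing
--     lines = text.split('\n')
--     current_char = {}
--
--     for line in lines:
--         line = line.strip()
--         if not line:
--             continue
--
--         if 'name' in line.lower() and ':' in line:
--             if current_char:
--                 characters.append(current_char)
--             current_char = {"name": line.split(':', 1)[1].strip().strip('"')}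
--         elif ':' in line and current_char:
--             key = line.split(':', 1)[0].lower().strip()
--             value = line.split(':', 1)[1].strip().strip('"')
--             if key in ['description', 'backstory', 'personality', 'first_appearance']:
--                 current_char[key] = value
--
--     if current_char:
--         characters.append(current_char)
--
--     return characters
-- ===== SOURCE B (Python) =====
-- def _parse_character_text(text):
--     """Two-pass rewrite: partition stripped lines into header-led blocks, then map each block to a dict."""
--     lines = [s for s in (ln.strip() for ln in text.split('\n')) if s]
--     blocks, cur = [], None
--     for ln in lines:
--         if 'name' in ln.lower() and ':' in ln:
--             if cur is not None:
--                 blocks.append(cur)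
--             cur = [ln]
--         elif cur is not None:
--             cur = cur + [ln]
--     if cur is not None:
--         blocks.append(cur)
--     fields = ('description', 'backstory', 'personality', 'first_appearance')
--     out = []
--     for head, *rest in blocks:
--         d = {'name': head.split(':', 1)[1].strip().strip('"')}
--         for ln in rest:
--             if ':' in ln:
--                 k, v = ln.split(':', 1)
--                 k = k.lower().strip()
--                 if k in fields:
--                     d[k] = v.strip().strip('"')
--         out.append(d)
--     return out
-- ===== Notes on version B (the rewrite author's own statement) =====
-- stated objective: alternative
-- what changed: A's single state machine (one fold carrying a growing dict) is re-decomposed into two passes: first partition the stripped non-blank lines into header-led blocks (dropping lines before the first 'name'-header), then map each block independently to its dict.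
import Mathlib
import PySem

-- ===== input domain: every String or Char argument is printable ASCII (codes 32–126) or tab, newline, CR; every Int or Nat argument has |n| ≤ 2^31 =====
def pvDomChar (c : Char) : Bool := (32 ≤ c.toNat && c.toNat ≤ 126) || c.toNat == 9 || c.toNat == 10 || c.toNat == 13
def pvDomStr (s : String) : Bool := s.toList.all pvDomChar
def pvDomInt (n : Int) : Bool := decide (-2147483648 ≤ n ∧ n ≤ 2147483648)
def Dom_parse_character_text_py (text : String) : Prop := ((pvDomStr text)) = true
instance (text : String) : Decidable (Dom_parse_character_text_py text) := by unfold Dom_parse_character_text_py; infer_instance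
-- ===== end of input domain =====

-- B re-decomposes A's one-pass state machine into two passes (partition lines into header-led blocks, then map each block to a dict); same cost, alternative structure; return value only.

-- shared text helpers (both Pythons use the same split(':',1)/strip/strip('"') idioms)
def pvSplit1 (line : String) : String × String :=
  match PySem.Str.splitMax? line ":" 1 with
  | some (a :: b :: _) => (a, b)
  | some (a :: _) => (a, "")
  | _ => ("", "")

def pvVal (line : String) : String :=
  PySem.Str.stripChars (PySem.Str.strip (pvSplit1 line).2) "\""

def pvKey (line : String) : String :=
  PySem.Str.strip (PySem.Str.lower (pvSplit1 line).1)

def pvIsHeader (line : String) : Bool :=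
  PySem.Str.isIn "name" (PySem.Str.lower line) && PySem.Str.isIn ":" line

def pvFields : List String := ["description", "backstory", "personality", "first_appearance"]

-- ===== PORT A =====
-- one fold over the raw lines, state = (finished characters, current dict); strip/skip inside the step
def pvStepA2 (st : List (PySem.Dict String String) × PySem.Dict String String) (line : String) :
    List (PySem.Dict String String) × PySem.Dict String String :=
  if line = "" then st
  else if pvIsHeader line then
    ((if st.2.items.isEmpty then st.1 else st.1 ++ [st.2]),
     PySem.Dict.empty.insert "name" (pvVal line))
  else if PySem.Str.isIn ":" line && !st.2.items.isEmpty then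
    (if pvFields.contains (pvKey line) then (st.1, st.2.insert (pvKey line) (pvVal line)) else st)
  else st

def pvStepA (st : List (PySem.Dict String String) × PySem.Dict String String) (rawline : String) :
    List (PySem.Dict String String) × PySem.Dict String String :=
  pvStepA2 st (PySem.Str.strip rawline)

def parse_character_text_py (text : String) : List (List (String × String)) :=
  let lines := ((PySem.Str.split? text "\n").getD [])
  let st := lines.foldl pvStepA ([], PySem.Dict.empty)
  let characters := if st.2.items.isEmpty then st.1 else st.1 ++ [st.2]
  characters.map PySem.Dict.items

-- ===== PORT B =====
-- pass 1: partition the stripped, non-blank lines into blocks opened by header lines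
def pvStepB (st : List (List String) × Option (List String)) (line : String) :
    List (List String) × Option (List String) :=
  if pvIsHeader line then
    ((match st.2 with | some b => st.1 ++ [b] | none => st.1), some [line])
  else
    match st.2 with
    | some b => (st.1, some (b ++ [line]))
    | none => st

-- pass 2: one block -> one dict
def pvField (d : PySem.Dict String String) (ln : String) : PySem.Dict String String :=
  if PySem.Str.isIn ":" ln then
    (if pvFields.contains (pvKey ln) then d.insert (pvKey ln) (pvVal ln) else d)
  else d

def pvBuild (blk : List String) : PySem.Dict String String :=
  match blk with
  | [] => PySem.Dict.empty   -- unreachable: every block starts with its header line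
  | head :: rest => rest.foldl pvField (PySem.Dict.empty.insert "name" (pvVal head))

def parse_character_text_py_alt (text : String) : List (List (String × String)) :=
  let lines := ((((PySem.Str.split? text "\n").getD [])).map PySem.Str.strip).filter (fun s => s ≠ "")
  let st := lines.foldl pvStepB ([], none)
  let blocks := match st.2 with | some b => st.1 ++ [b] | none => st.1
  (blocks.map pvBuild).map PySem.Dict.items

-- ===== PRECONDITION & SPEC =====
def Spec_parse_character_text_py (text : String) (out : List (List (String × String))) : Prop := out = parse_character_text_py_alt text
instance (text : String) (out : List (List (String × String))) : Decidable (Spec_parse_character_text_py text out) := by unfold Spec_parse_character_text_py; infer_instance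

-- ===== CLAIM (what is proved, stated in full; the proofs are below) =====
def Claim_equal_parse_character_text_py : Prop := ∀ (text : String), Dom_parse_character_text_py text → Spec_parse_character_text_py text (parse_character_text_py text)

-- ===== LEMMAS AND PROOFS =====

-- folding A's step over raw lines = folding the strip-free step over the stripped non-blank lines
lemma foldA_strip (raw : List String) :
    ∀ st, raw.foldl pvStepA st
      = (((raw.map PySem.Str.strip).filter (fun s => s ≠ "")).foldl pvStepA2 st) := by
  induction raw with
  | nil => intro st; rfl
  | cons hd tl ih =>
    intro st
    by_cases h : PySem.Str.strip hd = ""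
    · simp [List.foldl, pvStepA, pvStepA2, h, ih]
    · simp [List.foldl, pvStepA, h, ih]

lemma pvField_items_ne (rest : List String) :
    ∀ d : PySem.Dict String String, d.items ≠ [] → (rest.foldl pvField d).items ≠ [] := by
  induction rest with
  | nil => intro d h; exact h
  | cons hd tl ih =>
    intro d h
    apply ih
    unfold pvField
    split_ifs with h1 h2 <;> try exact h
    rw [PySem.Dict.items_insert]
    split_ifs with hc
    · simpa using h
    · simp

lemma pvBuild_items_ne (head : String) (rest : List String) :
    (pvBuild (head :: rest)).items ≠ [] := by
  apply pvField_items_ne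
  simp [PySem.Dict.items_insert]

-- the invariant tying A's fold state to B's fold state
def pvRel (sa : List (PySem.Dict String String) × PySem.Dict String String)
    (sb : List (List String) × Option (List String)) : Prop :=
  sa.1 = sb.1.map pvBuild ∧
  ((sb.2 = none ∧ sa.2 = PySem.Dict.empty) ∨
   (∃ bh br, sb.2 = some (bh :: br) ∧ sa.2 = pvBuild (bh :: br)))

lemma isEmpty_false_of_build (d : PySem.Dict String String) (bh : String) (br : List String)
    (h : d = pvBuild (bh :: br)) : d.items.isEmpty = false := by
  rw [List.isEmpty_eq_false_iff, h]
  exact pvBuild_items_ne bh br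

lemma stepA2_nonheader (sa : List (PySem.Dict String String) × PySem.Dict String String)
    (line : String) (hhdr : pvIsHeader line = false) (hne : sa.2.items.isEmpty = false) :
    pvStepA2 sa line = (sa.1, pvField sa.2 line) := by
  unfold pvStepA2 pvField
  by_cases hl : line = ""
  · subst hl
    have hc : PySem.Chars.isIn [':'] ([] : List Char) = false := by decide
    simp [hc, PySem.Str.isIn]
  · simp only [hl, hhdr, Bool.false_eq_true, if_false, hne, Bool.not_false, Bool.and_true]
    by_cases hc : PySem.Str.isIn ":" line = true
    · simp only [hc, if_true]
      split_ifs <;> rfl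
    · have hc' : PySem.Chars.isIn [':'] line.toList = false := by
        simpa [PySem.Str.isIn] using hc
      simp [hc']

lemma pvRel_step (line : String) (sa sb) (h : pvRel sa sb) :
    pvRel (pvStepA2 sa line) (pvStepB sb line) := by
  obtain ⟨h1, h2⟩ := h
  by_cases hhdr : pvIsHeader line = true
  · have hne : line ≠ "" := by
      intro he
      rw [he] at hhdr
      exact absurd hhdr (by decide)
    rcases h2 with ⟨hb, h2⟩ | ⟨bh, br, hb, h2⟩
    · have hE : sa.2.items.isEmpty = true := by rw [h2]; rfl
      have hA : pvStepA2 sa line = (sa.1, PySem.Dict.empty.insert "name" (pvVal line)) := by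
        simp [pvStepA2, hne, hhdr, hE]
      have hB : pvStepB sb line = (sb.1, some [line]) := by
        simp [pvStepB, hhdr, hb]
      rw [hA, hB]
      exact ⟨h1, Or.inr ⟨line, [], rfl, rfl⟩⟩
    · have hE : sa.2.items.isEmpty = false := isEmpty_false_of_build _ _ _ h2
      have hA : pvStepA2 sa line = (sa.1 ++ [sa.2], PySem.Dict.empty.insert "name" (pvVal line)) := by
        simp [pvStepA2, hne, hhdr, hE]
      have hB : pvStepB sb line = (sb.1 ++ [bh :: br], some [line]) := by
        simp [pvStepB, hhdr, hb]
      rw [hA, hB]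
      exact ⟨by simp [h1, h2], Or.inr ⟨line, [], rfl, rfl⟩⟩
  · have hhdr' : pvIsHeader line = false := by simpa using hhdr
    rcases h2 with ⟨hb, h2⟩ | ⟨bh, br, hb, h2⟩
    · -- no current block yet: both sides leave the state unchanged
      have hB : pvStepB sb line = sb := by
        cases sb with
        | mk l o => simp_all [pvStepB]
      have hE : sa.2.items.isEmpty = true := by rw [h2]; rfl
      have hA : pvStepA2 sa line = sa := by
        unfold pvStepA2
        by_cases hl : line = ""
        · simp [hl]
        · simp [hl, hhdr', hE]
      rw [hA, hB]
      exact ⟨h1, Or.inl ⟨hb, h2⟩⟩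
    · have hE : sa.2.items.isEmpty = false := isEmpty_false_of_build _ _ _ h2
      have hB : pvStepB sb line = (sb.1, some ((bh :: br) ++ [line])) := by
        simp [pvStepB, hhdr', hb]
      rw [stepA2_nonheader sa line hhdr' hE, hB]
      refine ⟨h1, Or.inr ⟨bh, br ++ [line], rfl, ?_⟩⟩
      rw [h2]
      simp [pvBuild, List.foldl_append]

lemma pvRel_fold (L : List String) :
    ∀ sa sb, pvRel sa sb → pvRel (L.foldl pvStepA2 sa) (L.foldl pvStepB sb) := by
  induction L with
  | nil => intro sa sb h; exact h
  | cons hd tl ih => intro sa sb h; exact ih _ _ (pvRel_step hd sa sb h)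

lemma pvFinalize (L : List String) :
    List.map PySem.Dict.items
      (if (List.foldl pvStepA2 ([], PySem.Dict.empty) L).2.items.isEmpty
       then (List.foldl pvStepA2 ([], PySem.Dict.empty) L).1
       else (List.foldl pvStepA2 ([], PySem.Dict.empty) L).1
            ++ [(List.foldl pvStepA2 ([], PySem.Dict.empty) L).2])
    = List.map PySem.Dict.items
        (List.map pvBuild
          (match (List.foldl pvStepB ([], none) L).2 with
           | some b => (List.foldl pvStepB ([], none) L).1 ++ [b]
           | none => (List.foldl pvStepB ([], none) L).1)) := by
  obtain ⟨h1, h2⟩ := pvRel_fold L ([], PySem.Dict.empty) ([], none) ⟨rfl, Or.inl ⟨rfl, rfl⟩⟩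
  rcases h2 with ⟨hb, h2⟩ | ⟨bh, br, hb, h2⟩
  · have hE : (List.foldl pvStepA2 ([], PySem.Dict.empty) L).2.items.isEmpty = true := by
      rw [h2]; rfl
    rw [hb, hE, if_pos rfl, h1]
  · have hE := isEmpty_false_of_build _ _ _ h2
    rw [hb, hE]
    simp only [Bool.false_eq_true, if_false]
    rw [h1, h2]
    simp [List.map_append]

lemma parse_equiv (text : String) :
    parse_character_text_py text = parse_character_text_py_alt text := by
  show List.map PySem.Dict.items
      (if (List.foldl pvStepA ([], PySem.Dict.empty) ((PySem.Str.split? text "\n").getD [])).2.items.isEmpty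
       then (List.foldl pvStepA ([], PySem.Dict.empty) ((PySem.Str.split? text "\n").getD [])).1
       else (List.foldl pvStepA ([], PySem.Dict.empty) ((PySem.Str.split? text "\n").getD [])).1
            ++ [(List.foldl pvStepA ([], PySem.Dict.empty) ((PySem.Str.split? text "\n").getD [])).2])
    = List.map PySem.Dict.items
        (List.map pvBuild
          (match (List.foldl pvStepB ([], none)
                    ((((PySem.Str.split? text "\n").getD []).map PySem.Str.strip).filter (fun s => s ≠ ""))).2 with
           | some b => (List.foldl pvStepB ([], none)
                    ((((PySem.Str.split? text "\n").getD []).map PySem.Str.strip).filter (fun s => s ≠ ""))).1 ++ [b]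
           | none => (List.foldl pvStepB ([], none)
                    ((((PySem.Str.split? text "\n").getD []).map PySem.Str.strip).filter (fun s => s ≠ ""))).1))
  rw [show ∀ st, List.foldl pvStepA st ((PySem.Str.split? text "\n").getD [])
        = List.foldl pvStepA2 st ((((PySem.Str.split? text "\n").getD []).map PySem.Str.strip).filter (fun s => s ≠ ""))
      from fun st => foldA_strip _ st]
  exact pvFinalize _

-- ===== VERDICT (by name: the statement is the Claim_ definition above) =====
theorem parse_character_text_py_spec : Claim_equal_parse_character_text_py := by
  intro text _
  unfold Spec_parse_character_text_py
  exact parse_equiv text
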